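-- pv_equiv track=rewrite | github.com/JB2811/LeetCode-Programming-questions | mamimum possible minimum distance on a given set of points located on an axis.py | rec
-- ===== SOURCE A (Python) =====
-- def rec(x,k,l,c):
--  i=0
--  if(k>0):
--   for i in range(len(x)):
--    l.append(x[i])
--    c=rec(x[i+1:],k-1,l,c)
--    l.pop()
--   return c
--  else:
--   t=[]
--   for m in range(0,len(l)):
--    for n in l[m+1:]:
--     t.append(abs(l[m]-n))
--   c=max(c,min(t))
--   return c
-- ===== SOURCE B (Python) =====
-- from itertools import combinations
--
--
-- def rec(x, k, l, c):
--     # Enumerate k-element combinations directly; the minimum pairwise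
--     # distance of a multiset is the minimum adjacent gap of its sorted order.
--     r = k if k > 0 else 0
--     if r > len(x):
--         return c  # no combination of that size exists
--     best = c
--     for comb in combinations(x, r):
--         s = sorted(l + list(comb))
--         best = max(best, min(b - a for a, b in zip(s, s[1:])))
--     return best
-- ===== Notes on version B (the rewrite author's own statement) =====
-- stated objective: alternative
-- what changed: A's per-element branching recursion with a mutated shared list and an all-pairs O(k^2) distance scan per leaf is replaced by direct enumeration of k-combinations with the minimum pairwise distance computed as the minimum adjacent gap of the sorted multiset (O(k log k) per subset).
import Mathlib
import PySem

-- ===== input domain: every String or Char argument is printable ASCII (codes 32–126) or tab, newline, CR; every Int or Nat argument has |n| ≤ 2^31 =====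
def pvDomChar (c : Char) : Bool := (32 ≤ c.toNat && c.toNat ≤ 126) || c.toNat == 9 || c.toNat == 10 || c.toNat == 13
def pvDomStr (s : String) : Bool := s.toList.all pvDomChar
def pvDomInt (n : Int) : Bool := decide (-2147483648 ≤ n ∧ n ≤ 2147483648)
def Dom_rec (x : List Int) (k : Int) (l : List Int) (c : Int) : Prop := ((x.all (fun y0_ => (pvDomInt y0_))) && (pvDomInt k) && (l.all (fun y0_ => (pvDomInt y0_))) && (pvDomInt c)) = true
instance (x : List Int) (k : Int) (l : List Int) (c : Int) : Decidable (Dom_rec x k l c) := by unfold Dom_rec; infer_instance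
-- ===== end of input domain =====

-- B replaces A's branch-per-element recursion plus all-pairs distance scan by direct
-- combination enumeration with sort-and-adjacent-gap minimum (objective: alternative).
-- A mutates its argument l transiently (append then pop) but restores it; the
-- equivalence proved here is about the return value.

-- ===== PORT A =====
-- inner double loop of the k==0 branch: t = [|l[m]-n| for m in range(len(l)) for n in l[m+1:]]
def pairsA : List Int → List Int
  | [] => []
  | h :: t => t.map (fun n => |h - n|) ++ pairsA t

-- `min(t)` raises ValueError on empty t (excluded by Pre_rec); .getD 0 is unreachable there.
mutual
  -- the body of Python's rec
  def rec (x : List Int) (k : Int) (l : List Int) (c : Int) : Int :=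
    if 0 < k then recLoop x k l c
    else max c ((PySem.List.min? (pairsA l) (fun y => y)).getD 0)
  termination_by (x.length, 1)
  decreasing_by all_goals exact Prod.Lex.right _ (by omega)
  -- the `for i in range(len(x))` loop: x[i] is the head, x[i+1:] the tail of the suffix;
  -- l.append(x[i]) / l.pop() is modelled by passing l ++ [h] to the recursive call.
  def recLoop (x : List Int) (k : Int) (l : List Int) (c : Int) : Int :=
    match x with
    | [] => c
    | h :: t => recLoop t k l (rec t (k - 1) (l ++ [h]) c)
  termination_by (x.length, 0)
  decreasing_by all_goals (apply Prod.Lex.left; simp)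
end


-- ===== PORT B =====
-- itertools.combinations(x, r) in its lexicographic order
def combsB : Nat → List Int → List (List Int)
  | 0, _ => [[]]
  | _ + 1, [] => []
  | n + 1, h :: t => (combsB n t).map (fun s => h :: s) ++ combsB (n + 1) t

-- min(b - a for a, b in zip(s, s[1:])) for s = sorted(pts); min() of an empty
-- generator raises ValueError (excluded by Pre_rec); .getD 0 is unreachable there.
def mindB (pts : List Int) : Int :=
  let s := PySem.List.sorted pts (fun y => y) false
  (PySem.List.min? ((s.zip s.tail).map (fun p => p.2 - p.1)) (fun y => y)).getD 0

def rec_alt (x : List Int) (k : Int) (l : List Int) (c : Int) : Int :=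
  if x.length < k.toNat then c  -- no combination of that size exists
  else (combsB k.toNat x).foldl (fun best s => max best (mindB (l ++ s))) c

-- ===== PRECONDITION & SPEC =====
-- Excluded are exactly the inputs where A (and B) raise ValueError (min of an empty
-- sequence): k ≤ 0 with fewer than two fixed points, or k = 1 with l empty and x nonempty.
def Pre_rec (x : List Int) (k : Int) (l : List Int) (c : Int) : Prop :=
  ¬ ((k ≤ 0 ∧ l.length < 2) ∨ (k = 1 ∧ l = [] ∧ x ≠ []))
instance (x : List Int) (k : Int) (l : List Int) (c : Int) : Decidable (Pre_rec x k l c) := by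
  unfold Pre_rec; infer_instance

def pvWitness_rec : List Int × Int × List Int × Int := ([1, 5, 9], 2, [], 0)

def Spec_rec (x : List Int) (k : Int) (l : List Int) (c : Int) (out : Int) : Prop := out = rec_alt x k l c
instance (x : List Int) (k : Int) (l : List Int) (c : Int) (out : Int) : Decidable (Spec_rec x k l c out) := by unfold Spec_rec; infer_instance

-- ===== CLAIM (what is proved, stated in full; the proofs are below) =====
def Claim_equal_rec : Prop := ∀ (x : List Int) (k : Int) (l : List Int) (c : Int), Dom_rec x k l c → Pre_rec x k l c → Spec_rec x k l c (rec x k l c)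

-- ===== LEMMAS AND PROOFS =====

-- A's min over all pairwise |differences| as an Option
def minPairs (pts : List Int) : Option Int := PySem.List.min? (pairsA pts) (fun y => y)

-- B's min over adjacent gaps as an Option's argument
def adjGaps (s : List Int) : List Int := (s.zip s.tail).map (fun p => p.2 - p.1)

theorem adjGaps_cons (h b : Int) (t : List Int) :
    adjGaps (h :: b :: t) = (b - h) :: adjGaps (b :: t) := rfl

theorem pairsA_cons (h : Int) (t : List Int) :
    pairsA (h :: t) = t.map (fun n => |h - n|) ++ pairsA t := rfl

-- two lists with mutually dominating elements have the same minimum value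
theorem min?_congr (L M : List Int)
    (h1 : ∀ a ∈ L, ∃ b ∈ M, b ≤ a) (h2 : ∀ b ∈ M, ∃ a ∈ L, a ≤ b) :
    PySem.List.min? L (fun y => y) = PySem.List.min? M (fun y => y) := by
  cases hL : PySem.List.min? L (fun y => y) with
  | none =>
    cases hM : PySem.List.min? M (fun y => y) with
    | none => rfl
    | some b =>
      exfalso
      rw [PySem.List.min?_eq_none_iff] at hL
      obtain ⟨a, ha, -⟩ := h2 b (PySem.List.min?_mem hM)
      simp [hL] at ha
  | some a =>
    cases hM : PySem.List.min? M (fun y => y) with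
    | none =>
      exfalso
      rw [PySem.List.min?_eq_none_iff] at hM
      obtain ⟨b, hb, -⟩ := h1 a (PySem.List.min?_mem hL)
      simp [hM] at hb
    | some b =>
      obtain ⟨b', hb', hb'a⟩ := h1 a (PySem.List.min?_mem hL)
      obtain ⟨a', ha', ha'b⟩ := h2 b (PySem.List.min?_mem hM)
      have hba : b ≤ a := le_trans (PySem.List.min?_isMin hM b' hb') hb'a
      have hab : a ≤ b := le_trans (PySem.List.min?_isMin hL a' ha') ha'b
      exact congrArg some (le_antisymm hab hba)

theorem append_middle_perm (A B P : List Int) : (A ++ (B ++ P)).Perm (B ++ (A ++ P)) := by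
  have h := (List.perm_append_comm (l₁ := A) (l₂ := B)).append_right P
  simpa [List.append_assoc] using h

theorem pairsA_perm {l₁ l₂ : List Int} (h : l₁.Perm l₂) : (pairsA l₁).Perm (pairsA l₂) := by
  induction h with
  | nil => exact List.Perm.refl _
  | cons a h ih =>
    rw [pairsA_cons, pairsA_cons]
    exact (h.map _).append ih
  | swap a b t =>
    rw [pairsA_cons, pairsA_cons, pairsA_cons, pairsA_cons, List.map_cons, List.map_cons]
    rw [abs_sub_comm b a]
    simp only [List.cons_append]
    exact List.Perm.cons _ (append_middle_perm _ _ _)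
  | trans _ _ ih₁ ih₂ => exact ih₁.trans ih₂

-- every adjacent gap of a sorted list is one of its pairwise |differences|
theorem adjGaps_subset_pairsA (s : List Int) (hs : s.Pairwise (· ≤ ·)) :
    ∀ g ∈ adjGaps s, g ∈ pairsA s := by
  induction s with
  | nil => simp [adjGaps]
  | cons h t ih =>
    cases t with
    | nil => simp [adjGaps]
    | cons b t' =>
      intro g hg
      have hhb : h ≤ b := (List.pairwise_cons.1 hs).1 b (by simp)
      rw [adjGaps_cons, List.mem_cons] at hg
      rw [pairsA_cons, List.mem_append]
      rcases hg with hg | hg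
      · subst hg
        exact Or.inl (List.mem_map.2 ⟨b, by simp, by rw [abs_of_nonpos (by omega)]; omega⟩)
      · exact Or.inr (ih (List.pairwise_cons.1 hs).2 g hg)

-- every pairwise |difference| of a sorted list dominates some adjacent gap
theorem pairsA_dominated (s : List Int) (hs : s.Pairwise (· ≤ ·)) :
    ∀ a ∈ pairsA s, ∃ g ∈ adjGaps s, g ≤ a := by
  induction s with
  | nil => simp [pairsA]
  | cons h t ih =>
    intro a ha
    rw [pairsA_cons, List.mem_append] at ha
    rcases ha with ha | ha
    · obtain ⟨n, hn, rfl⟩ := List.mem_map.1 ha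
      obtain ⟨b, t', rfl⟩ : ∃ b t', t = b :: t' := by
        cases t with
        | nil => simp at hn
        | cons b t' => exact ⟨b, t', rfl⟩
      have hhb : h ≤ b := (List.pairwise_cons.1 hs).1 b (by simp)
      have hbn : b ≤ n := by
        rcases List.mem_cons.1 hn with rfl | hn'
        · omega
        · exact (List.pairwise_cons.1 (List.pairwise_cons.1 hs).2).1 n hn'
      refine ⟨b - h, by rw [adjGaps_cons]; simp, ?_⟩
      rw [abs_of_nonpos (by omega)]; omega
    · obtain ⟨b, t', rfl⟩ : ∃ b t', t = b :: t' := by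
        cases t with
        | nil => rw [pairsA] at ha; simp at ha
        | cons b t' => exact ⟨b, t', rfl⟩
      obtain ⟨g, hg, hga⟩ := ih (List.pairwise_cons.1 hs).2 a ha
      exact ⟨g, by rw [adjGaps_cons, List.mem_cons]; exact Or.inr hg, hga⟩

-- the heart of the equivalence: min over all pairs = min adjacent gap of the sorted list
theorem mindA_eq_mindB (pts : List Int) :
    (minPairs pts).getD 0 = mindB pts := by
  have hperm : (PySem.List.sorted pts (fun y => y) false).Perm pts :=
    PySem.List.sorted_perm pts (fun y => y) false
  have hpw : (PySem.List.sorted pts (fun y => y) false).Pairwise (· ≤ ·) :=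
    PySem.List.sorted_pairwise pts (fun y => y)
  have hp : (pairsA pts).Perm (pairsA (PySem.List.sorted pts (fun y => y) false)) :=
    pairsA_perm hperm.symm
  have h1 : PySem.List.min? (pairsA pts) (fun y => y)
      = PySem.List.min? (pairsA (PySem.List.sorted pts (fun y => y) false)) (fun y => y) :=
    min?_congr _ _ (fun a ha => ⟨a, hp.mem_iff.1 ha, le_refl a⟩)
      (fun b hb => ⟨b, hp.mem_iff.2 hb, le_refl b⟩)
  have h2 : PySem.List.min? (pairsA (PySem.List.sorted pts (fun y => y) false)) (fun y => y)
      = PySem.List.min? (adjGaps (PySem.List.sorted pts (fun y => y) false)) (fun y => y) :=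
    min?_congr _ _ (pairsA_dominated _ hpw)
      (fun b hb => ⟨b, adjGaps_subset_pairsA _ hpw b hb, le_refl b⟩)
  simp only [minPairs, mindB, adjGaps] at h1 h2 ⊢
  rw [h1, h2]

-- A's recursion computes the fold of max over the lexicographic combination list
theorem recLoop_eq (x : List Int) : ∀ (k : Int) (l : List Int) (c : Int), 0 < k →
    recLoop x k l c = (combsB k.toNat x).foldl (fun b s => max b ((minPairs (l ++ s)).getD 0)) c := by
  induction x with
  | nil =>
    intro k l c hk
    obtain ⟨m, hm⟩ : ∃ m, k.toNat = m + 1 := ⟨k.toNat - 1, by omega⟩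
    simp [recLoop, hm, combsB]
  | cons h t ih =>
    intro k l c hk
    obtain ⟨m, hm⟩ : ∃ m, k.toNat = m + 1 := ⟨k.toNat - 1, by omega⟩
    have hm' : (k - 1).toNat = m := by omega
    have hinner : rec t (k - 1) (l ++ [h]) c =
        (combsB m t).foldl (fun b s => max b ((minPairs ((l ++ [h]) ++ s)).getD 0)) c := by
      by_cases hk1 : 0 < k - 1
      · rw [rec, if_pos hk1, ih (k - 1) (l ++ [h]) c hk1, hm']
      · have hm0 : m = 0 := by omega
        rw [rec, if_neg hk1, hm0]
        simp [combsB, minPairs]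
    rw [recLoop, ih k l _ hk, hm]
    simp only [combsB, List.foldl_append, List.foldl_map]
    congr 1
    rw [hinner]
    congr 1
    funext b s
    rw [← List.append_cons]

theorem rec_eq_fold (x : List Int) (k : Int) (l : List Int) (c : Int) :
    rec x k l c = (combsB k.toNat x).foldl (fun b s => max b ((minPairs (l ++ s)).getD 0)) c := by
  by_cases hk : 0 < k
  · rw [rec, if_pos hk]; exact recLoop_eq x k l c hk
  · have h0 : k.toNat = 0 := by omega
    rw [rec, if_neg hk, h0]
    simp [combsB, minPairs]

theorem combsB_eq_nil (n : Nat) (x : List Int) (h : x.length < n) : combsB n x = [] := by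
  induction x generalizing n with
  | nil => cases n with
    | zero => simp at h
    | succ m => rfl
  | cons a t ih =>
    cases n with
    | zero => simp at h
    | succ m =>
      rw [combsB, ih m (by simpa using h), ih (m + 1) (by simp at h; omega)]
      simp

-- ===== VERDICT (by name: the statement is the Claim_ definition above) =====
theorem rec_spec : Claim_equal_rec := by
  intro x k l c _ _
  unfold Spec_rec rec_alt
  rw [rec_eq_fold]
  by_cases h : x.length < k.toNat
  · rw [if_pos h, combsB_eq_nil _ _ h]
    rfl
  · rw [if_neg h]
    congr 1
    funext b s
    rw [mindA_eq_mindB]
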